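-- pv_equiv track=rewrite | github.com/siddhudonda/Blogwrite_gradio_prototype | app.py | inject_images
-- ===== SOURCE A (Python) =====
-- def inject_images(text, image_urls):
--     """Inject images into blog content at strategic positions"""
--     if not image_urls:
--         return text
--
--     paragraphs = text.split('\n\n')
--     result = []
--     img_idx = 0
--
--     for i, para in enumerate(paragraphs):
--         result.append(para)
--         # Insert image after every 2-3 paragraphs, but not immediately after title
--         if i > 0 and (i + 1) % 3 == 0 and img_idx < len(image_urls):
--             result.append(f"\n![Related Image]({image_urls[img_idx]})\n")
--             img_idx += 1
--
--     return '\n\n'.join(result)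
-- ===== SOURCE B (Python) =====
-- def inject_images(text, image_urls):
--     """Inject images into blog content at strategic positions"""
--     if not image_urls:
--         return text
--
--     paragraphs = text.split('\n\n')
--
--     def go(ps, urls):
--         # recursion over the structure: a full triple of paragraphs earns one
--         # image (consumed from the head of urls); a short tail is kept as-is
--         if len(ps) < 3:
--             return ps
--         head, rest = ps[:3], ps[3:]
--         if urls:
--             return head + [f"\n![Related Image]({urls[0]})\n"] + go(rest, urls[1:])
--         return head + go(rest, urls)
--
--     return '\n\n'.join(go(paragraphs, image_urls))
-- ===== Notes on version B (the rewrite author's own statement) =====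
-- stated objective: alternative
-- what changed: Replaced the indexed enumerate loop with its modulo-3 counter and img_idx state by a stateless structural recursion that splits the paragraph list into triples and consumes the image list head-first.
import Mathlib
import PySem

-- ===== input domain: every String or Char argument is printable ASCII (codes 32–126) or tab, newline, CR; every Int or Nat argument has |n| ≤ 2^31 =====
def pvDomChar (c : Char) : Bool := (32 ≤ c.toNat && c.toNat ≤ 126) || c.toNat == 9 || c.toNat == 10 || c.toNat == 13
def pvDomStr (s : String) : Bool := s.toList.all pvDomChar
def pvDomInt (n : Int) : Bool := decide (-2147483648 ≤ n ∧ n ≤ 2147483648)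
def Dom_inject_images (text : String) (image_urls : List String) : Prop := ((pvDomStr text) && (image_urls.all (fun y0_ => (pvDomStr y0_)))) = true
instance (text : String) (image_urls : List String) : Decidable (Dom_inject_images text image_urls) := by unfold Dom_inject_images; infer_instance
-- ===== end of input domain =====

-- B replaces A's indexed enumerate loop (modulo-3 counter + img_idx state) by a stateless
-- structural recursion over paragraph triples that consumes the image list head-first
-- (alternative decomposition; same asymptotic cost).

-- ===== PORT A =====
-- A's loop body: append the paragraph, then possibly the image markdown
def injA (urls : List String) (st : List String × Nat) (ip : Int × String) : List String × Nat :=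
  let res := st.1 ++ [ip.2]
  if ip.1 > 0 ∧ PySem.Int.mod (ip.1 + 1) 3 = 0 ∧ st.2 < urls.length then
    (res ++ ["\n![Related Image](" ++ urls.getD st.2 "" ++ ")\n"], st.2 + 1)
  else (res, st.2)

def inject_images (text : String) (image_urls : List String) : String :=
  if image_urls = [] then text
  else
    let paragraphs := (PySem.Str.split? text "\n\n").getD []
    let st := (PySem.List.enumerate paragraphs 0).foldl (injA image_urls) ([], 0)
    PySem.Str.join "\n\n" st.1

-- ===== PORT B =====
-- B's helper go(ps, urls): `len(ps) < 3` / `ps[:3]` / `ps[3:]` / `urls[0]` / `urls[1:]`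
-- become the structural patterns of the recursion (exact on lists)
def injGo : List String → List String → List String
  | a :: b :: c :: rest, u :: us =>
      a :: b :: c :: ("\n![Related Image](" ++ u ++ ")\n") :: injGo rest us
  | a :: b :: c :: rest, [] => a :: b :: c :: injGo rest []
  | ps, _ => ps

def inject_images_alt (text : String) (image_urls : List String) : String :=
  if image_urls = [] then text
  else
    let paragraphs := (PySem.Str.split? text "\n\n").getD []
    PySem.Str.join "\n\n" (injGo paragraphs image_urls)

-- ===== PRECONDITION & SPEC =====
def Spec_inject_images (text : String) (image_urls : List String) (out : String) : Prop := out = inject_images_alt text image_urls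
instance (text : String) (image_urls : List String) (out : String) : Decidable (Spec_inject_images text image_urls out) := by unfold Spec_inject_images; infer_instance

-- ===== CLAIM (what is proved, stated in full; the proofs are below) =====
def Claim_equal_inject_images : Prop := ∀ (text : String) (image_urls : List String), Dom_inject_images text image_urls → Spec_inject_images text image_urls (inject_images text image_urls)

-- ===== LEMMAS AND PROOFS =====

theorem pymod3 (x : Int) : PySem.Int.mod x 3 = x % 3 := by
  simp only [PySem.Int.mod]
  rw [Int.fmod_eq_emod, if_pos (Or.inl (by norm_num : (0 : Int) ≤ 3))]
  simp

theorem injA_skip (urls : List String) (res : List String) (k : Nat) (i : Int) (p : String)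
    (h : ¬ (i > 0 ∧ PySem.Int.mod (i + 1) 3 = 0 ∧ k < urls.length)) :
    injA urls (res, k) (i, p) = (res ++ [p], k) := by
  simp only [injA]
  rw [if_neg h]

theorem injA_hit (urls : List String) (res : List String) (k : Nat) (i : Int) (p : String)
    (h1 : i > 0) (h2 : PySem.Int.mod (i + 1) 3 = 0) (hk : k < urls.length) :
    injA urls (res, k) (i, p) =
      (res ++ [p] ++ ["\n![Related Image](" ++ urls.getD k "" ++ ")\n"], k + 1) := by
  simp only [injA]
  rw [if_pos ⟨h1, h2, hk⟩]

theorem injGo_short (ps urls : List String) (h : ps.length < 3) : injGo ps urls = ps := by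
  match ps, urls with
  | [], _ => cases urls <;> rfl
  | [a], _ => cases urls <;> rfl
  | [a, b], _ => cases urls <;> rfl
  | a :: b :: c :: rest, _ => simp only [List.length_cons] at h; omega

theorem drop_cons_of_lt (urls : List String) (k : Nat) (hk : k < urls.length) :
    urls.drop k = urls.getD k "" :: urls.drop (k + 1) := by
  rw [List.drop_eq_getElem_cons hk, List.getD_eq_getElem urls "" hk]

theorem loopA (urls : List String) : ∀ (ps : List String) (m : Nat) (res : List String) (k : Nat),
    ((PySem.List.enumerate ps ((3 * m : Nat) : Int)).foldl (injA urls) (res, k)).1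
      = res ++ injGo ps (urls.drop k)
  | [], _, res, k => by
      rw [PySem.List.enumerate_nil, injGo_short [] _ (by simp)]
      simp
  | [a], m, res, k => by
      simp only [PySem.List.enumerate_cons, PySem.List.enumerate_nil, List.foldl_cons, List.foldl_nil]
      rw [injA_skip urls res k _ a (by simp only [pymod3]; omega)]
      rw [injGo_short [a] _ (by simp)]
  | [a, b], m, res, k => by
      simp only [PySem.List.enumerate_cons, PySem.List.enumerate_nil, List.foldl_cons, List.foldl_nil]
      rw [injA_skip urls res k _ a (by simp only [pymod3]; omega)]
      rw [injA_skip urls (res ++ [a]) k _ b (by simp only [pymod3]; omega)]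
      rw [injGo_short [a, b] _ (by simp)]
      simp
  | a :: b :: c :: rest, m, res, k => by
      simp only [PySem.List.enumerate_cons, List.foldl_cons]
      rw [injA_skip urls res k _ a (by simp only [pymod3]; omega)]
      rw [injA_skip urls (res ++ [a]) k _ b (by simp only [pymod3]; omega)]
      rw [show ((3 * m : Nat) : Int) + 1 + 1 + 1 = ((3 * (m + 1) : Nat) : Int) by push_cast; ring]
      by_cases hk : k < urls.length
      · rw [injA_hit urls (res ++ [a] ++ [b]) k _ c (by omega) (by simp only [pymod3]; push_cast; omega) hk]
        rw [loopA urls rest (m + 1) _ (k + 1)]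
        rw [drop_cons_of_lt urls k hk]
        simp [injGo]
      · rw [injA_skip urls (res ++ [a] ++ [b]) k _ c (by tauto)]
        rw [loopA urls rest (m + 1) _ k]
        rw [List.drop_eq_nil_of_le (by omega)]
        simp [injGo]

-- ===== VERDICT (by name: the statement is the Claim_ definition above) =====
theorem inject_images_spec : Claim_equal_inject_images := by
  intro text image_urls _
  unfold Spec_inject_images
  by_cases h : image_urls = []
  · simp [inject_images, inject_images_alt, h]
  · have hA := loopA image_urls ((PySem.Str.split? text "\n\n").getD []) 0 [] 0
    simp only [Nat.mul_zero, Nat.cast_zero, List.drop_zero, List.nil_append] at hA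
    simp only [inject_images, inject_images_alt, if_neg h]
    rw [hA]
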